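-- pv_equiv track=rewrite | github.com/MachineWisdomAI/fava-trails | src/fava_trails/vcs/jj_backend.py | parse_snapshot_conflict
-- ===== SOURCE A (Python) =====
-- def parse_snapshot_conflict(text: str) -> tuple[str | None, str | None, str | None]:
--     """Parse JJ snapshot-style conflict markers from file content.
--
--     Returns (side_a, base, side_b). All None if unparseable.
--     Handles single and multiple conflict blocks — concatenates all sides.
--
--     Expected format:
--         <<<<<<< Conflict N of M
--         +++++++ Contents of side #1
--         content from side A
--         ------- Contents of base
--         base content
--         +++++++ Contents of side #2
--         content from side B
--         >>>>>>> Conflict N of M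
--     """
--     if "<<<<<<< Conflict" not in text:
--         return None, None, None
--
--     side_a_parts: list[str] = []
--     base_parts: list[str] = []
--     side_b_parts: list[str] = []
--     current_section: str | None = None
--
--     for line in text.splitlines():
--         if line.startswith("<<<<<<< Conflict"):
--             current_section = None
--             continue
--         if line.startswith(">>>>>>> Conflict"):
--             current_section = None
--             continue
--         if line.startswith("+++++++ Contents of side #1"):
--             current_section = "side_a"
--             continue
--         if line.startswith("------- Contents of base"):
--             current_section = "base"
--             continue
--         if line.startswith("+++++++ Contents of side #2"):
--             current_section = "side_b"
--             continue
--
--         if current_section == "side_a":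
--             side_a_parts.append(line)
--         elif current_section == "base":
--             base_parts.append(line)
--         elif current_section == "side_b":
--             side_b_parts.append(line)
--
--     # If we got nothing from any section, markers were unparseable
--     if not side_a_parts and not base_parts and not side_b_parts:
--         return None, None, None
--
--     return (
--         "\n".join(side_a_parts) if side_a_parts else None,
--         "\n".join(base_parts) if base_parts else None,
--         "\n".join(side_b_parts) if side_b_parts else None,
--     )
-- ===== SOURCE B (Python) =====
-- _MARKERS = (
--     ("<<<<<<< Conflict", None),
--     (">>>>>>> Conflict", None),
--     ("+++++++ Contents of side #1", "side_a"),
--     ("------- Contents of base", "base"),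
--     ("+++++++ Contents of side #2", "side_b"),
-- )
--
--
-- def _kind(line):
--     """None if `line` is no marker line; else a 1-tuple with the new section."""
--     for prefix, sec in _MARKERS:
--         if line.startswith(prefix):
--             return (sec,)
--     return None
--
--
-- def _span(lines):
--     """Split `lines` into (leading run of non-marker lines, remainder)."""
--     for j, line in enumerate(lines):
--         if _kind(line) is not None:
--             return lines[:j], lines[j:]
--     return lines, []
--
--
-- def parse_snapshot_conflict(text):
--     if "<<<<<<< Conflict" not in text:
--         return None, None, None
--     sides = {"side_a": [], "base": [], "side_b": []}
--     sec = None
--     rest = text.splitlines()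
--     while True:
--         pre, rest = _span(rest)
--         if sec is not None:
--             sides[sec] += pre
--         if not rest:
--             break
--         sec = _kind(rest[0])[0]
--         rest = rest[1:]
--     if not (sides["side_a"] or sides["base"] or sides["side_b"]):
--         return None, None, None
--     return tuple(
--         "\n".join(sides[k]) if sides[k] else None
--         for k in ("side_a", "base", "side_b")
--     )
-- ===== Notes on version B (the rewrite author's own statement) =====
-- stated objective: alternative
-- what changed: Replaces A's line-by-line state machine (a per-line current_section variable feeding three accumulators) by a chunk-wise scan: a span helper splits off each maximal run of non-marker lines, which is appended wholesale to the bucket of the governing marker, recursing on the remainder.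
import Mathlib
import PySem

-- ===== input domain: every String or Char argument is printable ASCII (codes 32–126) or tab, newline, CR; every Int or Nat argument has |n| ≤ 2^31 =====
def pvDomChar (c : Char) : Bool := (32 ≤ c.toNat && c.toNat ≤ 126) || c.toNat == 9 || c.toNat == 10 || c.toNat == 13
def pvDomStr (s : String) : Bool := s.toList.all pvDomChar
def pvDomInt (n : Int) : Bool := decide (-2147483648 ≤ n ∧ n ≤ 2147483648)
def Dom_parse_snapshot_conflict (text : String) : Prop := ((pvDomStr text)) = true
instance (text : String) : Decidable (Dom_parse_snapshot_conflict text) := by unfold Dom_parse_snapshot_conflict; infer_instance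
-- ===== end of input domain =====

-- B replaces A's per-line section state machine by a chunk-wise scan (span off each
-- marker-free run and append it wholesale); same O(n) cost, alternative structure.

-- ===== PORT A =====
-- A's loop body: state (side_a_parts, base_parts, side_b_parts, current_section)
def pvStepA (st : List String × List String × List String × Option String) (line : String) :
    List String × List String × List String × Option String :=
  if PySem.Str.startswith line "<<<<<<< Conflict" then (st.1, st.2.1, st.2.2.1, none)
  else if PySem.Str.startswith line ">>>>>>> Conflict" then (st.1, st.2.1, st.2.2.1, none)
  else if PySem.Str.startswith line "+++++++ Contents of side #1" then (st.1, st.2.1, st.2.2.1, some "side_a")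
  else if PySem.Str.startswith line "------- Contents of base" then (st.1, st.2.1, st.2.2.1, some "base")
  else if PySem.Str.startswith line "+++++++ Contents of side #2" then (st.1, st.2.1, st.2.2.1, some "side_b")
  else if st.2.2.2 = some "side_a" then (st.1 ++ [line], st.2.1, st.2.2.1, st.2.2.2)
  else if st.2.2.2 = some "base" then (st.1, st.2.1 ++ [line], st.2.2.1, st.2.2.2)
  else if st.2.2.2 = some "side_b" then (st.1, st.2.1, st.2.2.1 ++ [line], st.2.2.2)
  else st

def parse_snapshot_conflict (text : String) : Option String × Option String × Option String :=
  if ¬ (PySem.Str.isIn "<<<<<<< Conflict" text = true) then (none, none, none)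
  else
    let st := (PySem.Str.splitlines text).foldl pvStepA ([], [], [], none)
    if st.1 = [] ∧ st.2.1 = [] ∧ st.2.2.1 = [] then (none, none, none)
    else ((if st.1 = [] then none else some (PySem.Str.join "\n" st.1)),
          (if st.2.1 = [] then none else some (PySem.Str.join "\n" st.2.1)),
          (if st.2.2.1 = [] then none else some (PySem.Str.join "\n" st.2.2.1)))

-- ===== PORT B =====
-- B's _kind: none for a non-marker line, some sec (sec possibly none) for a marker line
def pvKind (line : String) : Option (Option String) :=
  if PySem.Str.startswith line "<<<<<<< Conflict" then some none
  else if PySem.Str.startswith line ">>>>>>> Conflict" then some none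
  else if PySem.Str.startswith line "+++++++ Contents of side #1" then some (some "side_a")
  else if PySem.Str.startswith line "------- Contents of base" then some (some "base")
  else if PySem.Str.startswith line "+++++++ Contents of side #2" then some (some "side_b")
  else none

-- add a whole marker-free run to the bucket named by sec
def pvAdd (sec : Option String) (pre : List String)
    (bs : List String × List String × List String) : List String × List String × List String :=
  if sec = some "side_a" then (bs.1 ++ pre, bs.2.1, bs.2.2)
  else if sec = some "base" then (bs.1, bs.2.1 ++ pre, bs.2.2)
  else if sec = some "side_b" then (bs.1, bs.2.1, bs.2.2 ++ pre)
  else bs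

-- B's while loop: span off the marker-free run, bucket it, consume the marker, recurse
def pvGoB (rest : List String) (sec : Option String)
    (bs : List String × List String × List String) : List String × List String × List String :=
  let pre := rest.takeWhile (fun l => (pvKind l).isNone)
  let bs' := if sec.isSome then pvAdd sec pre bs else bs
  match h : rest.dropWhile (fun l => (pvKind l).isNone) with
  | [] => bs'
  | m :: rest' => pvGoB rest' ((pvKind m).getD none) bs'
termination_by rest.length
decreasing_by
  have h1 : (rest.dropWhile (fun l => (pvKind l).isNone)).length ≤ rest.length :=
    List.length_dropWhile_le _ _
  rw [h] at h1; simp at h1 ⊢; omega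

def parse_snapshot_conflict_alt (text : String) : Option String × Option String × Option String :=
  if ¬ (PySem.Str.isIn "<<<<<<< Conflict" text = true) then (none, none, none)
  else
    let bs := pvGoB (PySem.Str.splitlines text) none ([], [], [])
    if bs.1 = [] ∧ bs.2.1 = [] ∧ bs.2.2 = [] then (none, none, none)
    else ((if bs.1 = [] then none else some (PySem.Str.join "\n" bs.1)),
          (if bs.2.1 = [] then none else some (PySem.Str.join "\n" bs.2.1)),
          (if bs.2.2 = [] then none else some (PySem.Str.join "\n" bs.2.2)))

-- ===== PRECONDITION & SPEC =====
def Spec_parse_snapshot_conflict (text : String) (out : Option String × Option String × Option String) : Prop := out = parse_snapshot_conflict_alt text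
instance (text : String) (out : Option String × Option String × Option String) : Decidable (Spec_parse_snapshot_conflict text out) := by unfold Spec_parse_snapshot_conflict; infer_instance

-- ===== CLAIM (what is proved, stated in full; the proofs are below) =====
def Claim_equal_parse_snapshot_conflict : Prop := ∀ (text : String), Dom_parse_snapshot_conflict text → Spec_parse_snapshot_conflict text (parse_snapshot_conflict text)

-- ===== LEMMAS AND PROOFS =====

-- a marker line: pvStepA just sets current_section to what pvKind names
theorem pvStepA_marker (st : List String × List String × List String × Option String)
    (m : String) (s : Option String) (h : pvKind m = some s) :
    pvStepA st m = (st.1, st.2.1, st.2.2.1, s) := by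
  unfold pvKind at h; unfold pvStepA
  split_ifs at h ⊢ <;> simp_all

-- a content line: pvStepA appends it to the bucket of the current section
theorem pvStepA_content (sa b sb : List String) (sec : Option String)
    (l : String) (h : pvKind l = none) :
    pvStepA (sa, b, sb, sec) l =
      ((pvAdd sec [l] (sa, b, sb)).1, (pvAdd sec [l] (sa, b, sb)).2.1,
       (pvAdd sec [l] (sa, b, sb)).2.2, sec) := by
  unfold pvKind at h; unfold pvStepA pvAdd
  split_ifs at h ⊢ <;> simp_all

theorem pvAdd_append (sec : Option String) (p q : List String)
    (bs : List String × List String × List String) :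
    pvAdd sec q (pvAdd sec p bs) = pvAdd sec (p ++ q) bs := by
  unfold pvAdd; split_ifs <;> simp

theorem pvAdd_none (pre : List String) (bs : List String × List String × List String) :
    pvAdd none pre bs = bs := by
  unfold pvAdd; simp

-- folding A's step over a marker-free run appends the whole run to the section's bucket
theorem foldA_content_run (pre : List String) (h : ∀ l ∈ pre, pvKind l = none)
    (sa b sb : List String) (sec : Option String) :
    pre.foldl pvStepA (sa, b, sb, sec) =
      ((pvAdd sec pre (sa, b, sb)).1, (pvAdd sec pre (sa, b, sb)).2.1,
       (pvAdd sec pre (sa, b, sb)).2.2, sec) := by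
  induction pre generalizing sa b sb with
  | nil => unfold pvAdd; split_ifs <;> simp
  | cons l t ih =>
    have hl : pvKind l = none := h l (by simp)
    have ht : ∀ x ∈ t, pvKind x = none := fun x hx => h x (by simp [hx])
    rw [List.foldl_cons, pvStepA_content _ _ _ _ _ hl]
    rw [ih ht (pvAdd sec [l] (sa, b, sb)).1 (pvAdd sec [l] (sa, b, sb)).2.1
      (pvAdd sec [l] (sa, b, sb)).2.2]
    simp only [Prod.mk.eta, pvAdd_append]
    simp

-- the main invariant: A's fold and B's chunk recursion compute the same buckets
theorem goB_eq_foldA (rest : List String) (sec : Option String) (sa b sb : List String) :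
    pvGoB rest sec (sa, b, sb) =
      ((rest.foldl pvStepA (sa, b, sb, sec)).1,
       (rest.foldl pvStepA (sa, b, sb, sec)).2.1,
       (rest.foldl pvStepA (sa, b, sb, sec)).2.2.1) := by
  rw [pvGoB]
  set pre := rest.takeWhile (fun l => (pvKind l).isNone) with hpredef
  have hpre : ∀ l ∈ pre, pvKind l = none := by
    intro l hl
    have := List.mem_takeWhile_imp hl
    simpa [Option.isNone_iff_eq_none] using this
  have hsec : (if sec.isSome then pvAdd sec pre (sa, b, sb) else (sa, b, sb))
      = pvAdd sec pre (sa, b, sb) := by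
    cases sec <;> simp [pvAdd_none]
  rw [hsec]
  cases hdrop : rest.dropWhile (fun l => (pvKind l).isNone) with
  | nil =>
    have hr : rest = pre := by
      rw [hpredef]
      conv_lhs => rw [← List.takeWhile_append_dropWhile (p := fun l => (pvKind l).isNone) (l := rest)]
      rw [hdrop, List.append_nil]
    rw [hr, foldA_content_run pre hpre]
  | cons m rest' =>
    have hm : (pvKind m).isNone = false := by
      have := List.head_dropWhile_not (fun l => (pvKind l).isNone) (l := rest)
      rw [hdrop] at this; simpa using this
    obtain ⟨s, hs⟩ : ∃ s, pvKind m = some s := by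
      cases hk : pvKind m with
      | none => rw [hk] at hm; simp at hm
      | some s => exact ⟨s, rfl⟩
    have hr : rest = pre ++ m :: rest' := by
      rw [hpredef]
      conv_lhs => rw [← List.takeWhile_append_dropWhile (p := fun l => (pvKind l).isNone) (l := rest)]
      rw [hdrop]
    have ih := goB_eq_foldA rest' s (pvAdd sec pre (sa, b, sb)).1
      (pvAdd sec pre (sa, b, sb)).2.1 (pvAdd sec pre (sa, b, sb)).2.2
    rw [hr, List.foldl_append, foldA_content_run pre hpre, List.foldl_cons,
      pvStepA_marker _ _ _ hs]
    simpa [hs, Prod.mk.eta] using ih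
termination_by rest.length
decreasing_by
  have h1 : (rest.dropWhile (fun l => (pvKind l).isNone)).length ≤ rest.length :=
    List.length_dropWhile_le _ _
  rw [hdrop] at h1; simp at h1 ⊢; omega

-- ===== VERDICT (by name: the statement is the Claim_ definition above) =====
theorem parse_snapshot_conflict_spec : Claim_equal_parse_snapshot_conflict := by
  intro text _
  unfold Spec_parse_snapshot_conflict parse_snapshot_conflict parse_snapshot_conflict_alt
  rw [goB_eq_foldA]
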